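-- pv_equiv track=rewrite | github.com/Era-Aich/codeforces_Solve | codeforces1857A.py | arrray
-- ===== SOURCE A (Python) =====
-- def arrray(n,arr):
--     odd_list=[]
--     even_list=[]
--
--     for i in range(len(arr)):
--         if arr[i]%2==0:
--             even_list.append(arr[i])
--         else:
--             odd_list.append(arr[i])
--
--     e = sum(even_list)
--     o = sum(odd_list)
--
--     if e%2==0 and o%2==0 or e%2!=0 and o%2!=0:
--         return "YES"
--     else:
--         return "NO"
-- ===== SOURCE B (Python) =====
-- def arrray(n, arr):
--     return "YES" if sum(arr) % 2 == 0 else "NO"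
-- ===== Notes on version B (the rewrite author's own statement) =====
-- stated objective: simpler
-- what changed: B drops the even/odd partition and the two per-group sums entirely: since the even-valued group's sum is always even, A's same-parity condition equals 'total sum is even', which B tests in one closed-form expression.
import Mathlib
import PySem

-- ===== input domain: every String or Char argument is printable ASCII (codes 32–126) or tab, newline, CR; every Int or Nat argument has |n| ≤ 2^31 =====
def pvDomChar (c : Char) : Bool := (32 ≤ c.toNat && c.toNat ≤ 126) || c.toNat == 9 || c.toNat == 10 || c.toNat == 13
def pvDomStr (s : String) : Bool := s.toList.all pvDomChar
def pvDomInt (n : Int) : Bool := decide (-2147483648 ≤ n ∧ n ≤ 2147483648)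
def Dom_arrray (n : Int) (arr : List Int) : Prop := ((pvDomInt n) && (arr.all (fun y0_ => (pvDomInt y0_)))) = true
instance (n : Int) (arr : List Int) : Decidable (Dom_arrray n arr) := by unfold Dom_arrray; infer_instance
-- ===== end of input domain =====

-- B replaces A's even/odd partition and two group sums by a single total-sum parity test (objective: simpler).

-- ===== PORT A =====
-- loop body: append arr[i] to even_list or odd_list; state = (odd_list, even_list)
def arrrayStep (st : List Int × List Int) (x : Int) : List Int × List Int :=
  if PySem.Int.mod x 2 = 0 then (st.1, st.2 ++ [x]) else (st.1 ++ [x], st.2)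

def arrray (n : Int) (arr : List Int) : String :=
  let st := (PySem.List.pyRange 0 (PySem.List.len arr) 1).foldl
      (fun st i => arrrayStep st (PySem.List.pyGetD arr i 0)) ([], [])
  let e := st.2.sum
  let o := st.1.sum
  if (PySem.Int.mod e 2 = 0 ∧ PySem.Int.mod o 2 = 0) ∨
     (PySem.Int.mod e 2 ≠ 0 ∧ PySem.Int.mod o 2 ≠ 0) then "YES" else "NO"

-- ===== PORT B =====
def arrray_alt (n : Int) (arr : List Int) : String :=
  if PySem.Int.mod arr.sum 2 = 0 then "YES" else "NO"

-- ===== PRECONDITION & SPEC =====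
def Spec_arrray (n : Int) (arr : List Int) (out : String) : Prop := out = arrray_alt n arr
instance (n : Int) (arr : List Int) (out : String) : Decidable (Spec_arrray n arr out) := by unfold Spec_arrray; infer_instance

-- ===== CLAIM (what is proved, stated in full; the proofs are below) =====
def Claim_equal_arrray : Prop := ∀ (n : Int) (arr : List Int), Dom_arrray n arr → Spec_arrray n arr (arrray n arr)

-- ===== LEMMAS AND PROOFS =====
theorem arrrayLoop_parity (arr : List Int) (st : List Int × List Int) :
    (arr.foldl arrrayStep st).1.sum % 2 = (st.1.sum + arr.sum) % 2 ∧
    (arr.foldl arrrayStep st).2.sum % 2 = st.2.sum % 2 := by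
  induction arr generalizing st with
  | nil => simp
  | cons x xs ih =>
    simp only [List.foldl_cons, List.sum_cons]
    rcases ih (arrrayStep st x) with ⟨h1, h2⟩
    by_cases h : x % 2 = 0
    · have hs : arrrayStep st x = (st.1, st.2 ++ [x]) := by simp [arrrayStep, PySem.Int.mod_eq_emod_of_pos (a := x) (b := 2) (by norm_num : (0:Int) < 2), h]
      rw [hs] at h1 h2
      simp only [hs, h1, h2]
      constructor
      · omega
      · simp only [List.sum_append, List.sum_cons, List.sum_nil]; omega
    · have hs : arrrayStep st x = (st.1 ++ [x], st.2) := by simp [arrrayStep, PySem.Int.mod_eq_emod_of_pos (a := x) (b := 2) (by norm_num : (0:Int) < 2), h]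
      rw [hs] at h1 h2
      simp only [hs, h1, h2]
      constructor
      · simp only [List.sum_append, List.sum_cons, List.sum_nil]; omega
      · trivial

-- ===== VERDICT (by name: the statement is the Claim_ definition above) =====
theorem arrray_spec : Claim_equal_arrray := by
  intro n arr _
  unfold Spec_arrray arrray arrray_alt
  rw [PySem.List.foldl_pyRange_zero_pyGetD arr 0 arrrayStep ([], [])]
  rcases arrrayLoop_parity arr ([], []) with ⟨h1, h2⟩
  simp only [List.sum_nil, zero_add] at h1 h2
  have hm : ∀ a : Int, PySem.Int.mod a 2 = a % 2 := fun a => PySem.Int.mod_eq_emod_of_pos (by norm_num)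
  simp only [hm, h1, h2]
  have : (0 : Int) % 2 = 0 := by norm_num
  split_ifs with hc hs hs <;> try rfl
  · rcases hc with ⟨_, ho⟩ | ⟨he, _⟩
    · exact absurd ho hs
    · exact absurd this he
  · rcases (not_or.mp hc) with ⟨hA, _⟩
    exact absurd ⟨this, hs⟩ hA
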